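-- pv_equiv track=rewrite | github.com/rockyedmund/AAS | Source Code/AAS/AAS.py | countClass
-- ===== SOURCE A (Python) =====
-- def countClass(output):
--     class_count = [0,0,0]
--     for i in output :
--         if i == 1 :
--             class_count[0] +=1
--         elif i == 2:
--             class_count[1] +=1
--         else :
--             class_count[2] +=1
--     return(class_count)
-- ===== SOURCE B (Python) =====
-- def countClass(output):
--     ones = output.count(1)
--     twos = output.count(2)
--     return [ones, twos, len(output) - ones - twos]
-- ===== Notes on version B (the rewrite author's own statement) =====
-- stated objective: simpler
-- what changed: Replaces the single pass with per-element if/elif branching into three mutable accumulators by three staged whole-list reductions: count(1), count(2), and the third bucket computed by subtraction from the length.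
import Mathlib
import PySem

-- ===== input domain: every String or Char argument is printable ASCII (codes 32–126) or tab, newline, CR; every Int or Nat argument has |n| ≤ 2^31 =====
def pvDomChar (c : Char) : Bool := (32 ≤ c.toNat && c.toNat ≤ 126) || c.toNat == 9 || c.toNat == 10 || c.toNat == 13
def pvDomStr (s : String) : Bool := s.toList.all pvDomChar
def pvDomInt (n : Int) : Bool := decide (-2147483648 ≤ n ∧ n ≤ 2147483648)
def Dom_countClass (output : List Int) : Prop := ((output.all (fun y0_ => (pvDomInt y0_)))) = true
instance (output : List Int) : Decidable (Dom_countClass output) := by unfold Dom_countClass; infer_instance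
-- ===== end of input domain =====

-- B replaces A's single pass with per-element if/elif branching into three accumulators by
-- three staged whole-list reductions (count(1), count(2), remainder by subtraction); objective: simpler.

-- ===== PORT A =====
-- loop body: class_count[0]+=1 / [1]+=1 / [2]+=1 on the 3-element list, indices always in range
def countClass (output : List Int) : List Int :=
  output.foldl (fun cc i =>
    if i == 1 then PySem.List.pySetD cc 0 (PySem.List.pyGetD cc 0 0 + 1)
    else if i == 2 then PySem.List.pySetD cc 1 (PySem.List.pyGetD cc 1 0 + 1)
    else PySem.List.pySetD cc 2 (PySem.List.pyGetD cc 2 0 + 1)) [0, 0, 0]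

-- ===== PORT B =====
def countClass_alt (output : List Int) : List Int :=
  let ones : Int := PySem.List.count output 1
  let twos : Int := PySem.List.count output 2
  [ones, twos, (output.length : Int) - ones - twos]

-- ===== PRECONDITION & SPEC =====
def Spec_countClass (output : List Int) (out : List Int) : Prop := out = countClass_alt output
instance (output : List Int) (out : List Int) : Decidable (Spec_countClass output out) := by unfold Spec_countClass; infer_instance

-- ===== CLAIM =====
def Claim_equal_countClass : Prop := ∀ (output : List Int), Dom_countClass output → Spec_countClass output (countClass output)

-- ===== LEMMAS AND PROOFS =====
def fA : List Int → Int → List Int := fun cc i =>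
  if i == 1 then PySem.List.pySetD cc 0 (PySem.List.pyGetD cc 0 0 + 1)
  else if i == 2 then PySem.List.pySetD cc 1 (PySem.List.pyGetD cc 1 0 + 1)
  else PySem.List.pySetD cc 2 (PySem.List.pyGetD cc 2 0 + 1)

lemma fA_state (a b c i : Int) :
    fA [a, b, c] i = if i = 1 then [a + 1, b, c] else if i = 2 then [a, b + 1, c] else [a, b, c + 1] := by
  simp [fA, PySem.List.pySetD, PySem.List.pySet?, PySem.List.pyGetD, PySem.List.pyGet?,
    PySem.List.pyIdx?]

lemma countClass_loop (xs : List Int) : ∀ (a b c : Int),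
    xs.foldl fA [a, b, c]
    = [a + xs.count 1, b + xs.count 2,
       c + ((xs.length : Int) - xs.count 1 - xs.count 2)] := by
  induction xs with
  | nil => intro a b c; simp
  | cons x t ih =>
    intro a b c
    rw [List.foldl_cons, fA_state]
    by_cases h1 : x = 1
    · subst h1
      rw [if_pos rfl, ih]
      simp [List.count_cons]
      omega
    · by_cases h2 : x = 2
      · subst h2
        rw [if_neg h1, if_pos rfl, ih]
        simp [List.count_cons, h1]
        omega
      · rw [if_neg h1, if_neg h2, ih]
        simp [List.count_cons, h1, h2]
        omega

-- ===== VERDICT =====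
theorem countClass_spec : Claim_equal_countClass := by
  intro output _
  unfold Spec_countClass countClass_alt
  have h : countClass output = output.foldl fA [0, 0, 0] := rfl
  rw [h, countClass_loop]
  simp [PySem.List.count_eq]
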